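-- pv_equiv track=rewrite | github.com/Mujammilmaldar/exam-ai | practicals/q9_inverted_index_precision.py | search_query
-- ===== SOURCE A (Python) =====
-- def search_query(query, index):
--     terms = query.lower().split()
--     results = {}
--
--     for term in terms:
--         if term in index:
--             for doc_id in index[term]:
--                 if doc_id not in results:
--                     results[doc_id] = set()
--                 results[doc_id].add(term)
--
--     return results
-- ===== SOURCE B (Python) =====
-- def search_query(query, index):
--     terms = query.lower().split()
--     # gather pass: the candidate document universe, first-occurrence order
--     docs = dict.fromkeys(d for t in terms if t in index for d in index[t])
--     # document-centric pass: each doc's matched terms by a membership filter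
--     return {d: {t for t in terms if t in index and d in index[t]} for d in docs}
-- ===== Notes on version B (the rewrite author's own statement) =====
-- stated objective: alternative
-- what changed: Replaces the term-centric scatter (incrementally growing a dict of per-doc sets while iterating posting lists) with a gather/document-centric construction: a pre-pass unions the posting lists of matched terms into the candidate document universe, then each doc's term set is built directly by filtering the query terms for membership of the doc in their posting lists.
import Mathlib
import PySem

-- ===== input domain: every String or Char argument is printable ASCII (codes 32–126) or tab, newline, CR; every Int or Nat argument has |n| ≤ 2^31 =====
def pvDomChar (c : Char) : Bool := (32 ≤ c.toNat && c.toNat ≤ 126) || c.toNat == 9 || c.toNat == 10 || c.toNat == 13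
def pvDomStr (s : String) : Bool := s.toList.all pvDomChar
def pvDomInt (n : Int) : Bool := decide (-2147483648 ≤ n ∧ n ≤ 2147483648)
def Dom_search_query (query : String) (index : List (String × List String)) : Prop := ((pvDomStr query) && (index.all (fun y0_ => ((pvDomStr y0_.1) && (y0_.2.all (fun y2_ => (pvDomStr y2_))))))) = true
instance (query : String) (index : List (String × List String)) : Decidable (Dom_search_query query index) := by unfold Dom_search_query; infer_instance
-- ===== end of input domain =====

-- B replaces A's term-centric scatter into a growing dict with a gather pass (candidate doc
-- universe = ordered union of matched posting lists) followed by a per-doc membership filter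
-- over the query terms; same values and insertion order, similar cost (objective: alternative).


-- ===== PORT A =====
-- literal transliteration of A: for term in terms / if term in index / for doc_id in index[term] /
-- if doc_id not in results: results[doc_id] = set() / results[doc_id].add(term)
def search_query (query : String) (index : List (String × List String)) : List (String × List String) :=
  let terms := PySem.Str.split₀ (PySem.Str.lower query)
  let idx : PySem.Dict String (List String) := PySem.Dict.ofList index
  let results : PySem.Dict String (PySem.Set String) :=
    terms.foldl (fun results term =>
      if idx.contains term then
        (idx.getD term []).foldl (fun r doc_id =>
          let r1 := if r.contains doc_id then r else r.insert doc_id PySem.Set.empty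
          r1.modify doc_id PySem.Set.empty (fun s => s.add term)) results
      else results) PySem.Dict.empty
  results.items

-- ===== PORT B =====
-- transliteration of Source B: dict.fromkeys (ordered dedup) over the matched posting lists, then a
-- dict comprehension mapping each doc to the set of query terms whose posting list contains it
def search_query_alt (query : String) (index : List (String × List String)) : List (String × List String) :=
  let terms := PySem.Str.split₀ (PySem.Str.lower query)
  let idx : PySem.Dict String (List String) := PySem.Dict.ofList index
  let docs : List String :=
    PySem.List.dedup (terms.flatMap (fun t => if idx.contains t then idx.getD t [] else []))
  docs.map (fun d =>
    (d, PySem.Set.ofList (terms.filter (fun t => idx.contains t && (idx.getD t []).contains d))))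

-- ===== PRECONDITION & SPEC =====
def Spec_search_query (query : String) (index : List (String × List String)) (out : List (String × List String)) : Prop := out = search_query_alt query index
instance (query : String) (index : List (String × List String)) (out : List (String × List String)) : Decidable (Spec_search_query query index out) := by unfold Spec_search_query; infer_instance

-- ===== CLAIM (what is proved, stated in full; the proofs are below) =====
def Claim_equal_search_query : Prop := ∀ (query : String) (index : List (String × List String)), Dom_search_query query index → Spec_search_query query index (search_query query index)

-- ===== LEMMAS AND PROOFS =====

-- the effective posting list of a term (empty when the term is not in the index)
def pvPostings (idx : PySem.Dict String (List String)) (t : String) : List String :=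
  if idx.contains t then idx.getD t [] else []

-- A's inner-loop body
def pvStep (term : String) (r : PySem.Dict String (PySem.Set String)) (doc_id : String) :
    PySem.Dict String (PySem.Set String) :=
  let r1 := if r.contains doc_id then r else r.insert doc_id PySem.Set.empty
  r1.modify doc_id PySem.Set.empty (fun s => s.add term)

theorem pvStep_getD' (term : String) (r : PySem.Dict String (PySem.Set String)) (doc_id d : String) :
    (pvStep term r doc_id).getD d [] =
      if d = doc_id then (r.getD d []).add term else r.getD d [] := by
  unfold pvStep
  by_cases hc : r.contains doc_id = true <;>
    by_cases hd : d = doc_id <;>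
      simp [hc, hd, PySem.Dict.getD_modify, PySem.Dict.getD_insert,
        PySem.Dict.getD_of_not_contains, PySem.Set.empty]

theorem pvInner_getD (term : String) (ps : List String)
    (r : PySem.Dict String (PySem.Set String)) (d : String) :
    (ps.foldl (pvStep term) r).getD d [] =
      if ps.contains d then (r.getD d []).add term else r.getD d [] := by
  induction ps generalizing r with
  | nil => simp
  | cons doc rest ih =>
    simp only [List.foldl_cons, ih, pvStep_getD']
    by_cases hd : d = doc <;> by_cases hr : rest.contains d = true
    · simp [hd]
    · simp [hd]
    · simp [hd]
    · simp [hd]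

theorem pvStep_keys (term : String) (r : PySem.Dict String (PySem.Set String)) (doc_id : String) :
    (pvStep term r doc_id).keys = PySem.Set.add r.keys doc_id := by
  unfold pvStep
  by_cases hc : r.contains doc_id = true
  · have hm : doc_id ∈ r.keys := (PySem.Dict.contains_iff_mem_keys r doc_id).1 hc
    rw [if_pos hc, PySem.Dict.keys_modify, PySem.Dict.keys_insert_of_contains _ _ hc]
    simp [PySem.Set.add, hm]
  · have hm : ¬ doc_id ∈ r.keys := fun h =>
      hc ((PySem.Dict.contains_iff_mem_keys r doc_id).2 h)
    rw [if_neg hc, PySem.Dict.keys_modify,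
      PySem.Dict.keys_insert_of_contains _ _ (PySem.Dict.contains_insert_self r doc_id _),
      PySem.Dict.keys_insert_of_not_contains _ _ (by simpa using hc)]
    simp [PySem.Set.add, hm]

theorem pvInner_keys (term : String) (ps : List String)
    (r : PySem.Dict String (PySem.Set String)) :
    (ps.foldl (pvStep term) r).keys = PySem.Set.update r.keys ps := by
  induction ps generalizing r with
  | nil => simp [PySem.Set.update]
  | cons doc rest ih => simp [List.foldl_cons, ih, pvStep_keys, PySem.Set.update]

-- A's outer-loop body
def pvOuter (idx : PySem.Dict String (List String))
    (results : PySem.Dict String (PySem.Set String)) (term : String) :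
    PySem.Dict String (PySem.Set String) :=
  if idx.contains term then (idx.getD term []).foldl (pvStep term) results else results

theorem pvFold_getD (idx : PySem.Dict String (List String)) (ts : List String)
    (r : PySem.Dict String (PySem.Set String)) (d : String) :
    (ts.foldl (pvOuter idx) r).getD d [] =
      PySem.Set.update (r.getD d [])
        (ts.filter (fun t => (pvPostings idx t).contains d)) := by
  induction ts generalizing r with
  | nil => simp [PySem.Set.update]
  | cons t rest ih =>
    simp only [List.foldl_cons, ih, List.filter_cons]
    by_cases hc : idx.contains t = true
    · by_cases hd : d ∈ idx.getD t [] <;>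
        simp [pvOuter, pvPostings, hc, hd, pvInner_getD, PySem.Set.update]
    · simp [pvOuter, pvPostings, hc]

theorem pvFold_keys (idx : PySem.Dict String (List String)) (ts : List String)
    (r : PySem.Dict String (PySem.Set String)) :
    (ts.foldl (pvOuter idx) r).keys =
      PySem.Set.update r.keys (ts.flatMap (pvPostings idx)) := by
  induction ts generalizing r with
  | nil => simp [PySem.Set.update]
  | cons t rest ih =>
    simp only [List.foldl_cons, ih, List.flatMap_cons]
    by_cases hc : idx.contains t = true <;>
      simp [pvOuter, pvPostings, hc, pvInner_keys, PySem.Set.update, List.foldl_append]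

-- ===== VERDICT (by name: the statement is the Claim_ definition above) =====
set_option maxHeartbeats 2000000 in
theorem search_query_spec : Claim_equal_search_query := by
  intro query index _
  unfold Spec_search_query search_query search_query_alt
  show (List.foldl (pvOuter (PySem.Dict.ofList index)) PySem.Dict.empty
          (PySem.Str.split₀ (PySem.Str.lower query))).items =
    (PySem.List.dedup ((PySem.Str.split₀ (PySem.Str.lower query)).flatMap
        (fun t => if (PySem.Dict.ofList index).contains t then
          (PySem.Dict.ofList index).getD t [] else []))).map (fun d =>
      (d, PySem.Set.ofList ((PySem.Str.split₀ (PySem.Str.lower query)).filter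
        (fun t => (PySem.Dict.ofList index).contains t &&
          ((PySem.Dict.ofList index).getD t []).contains d))))
  have hkeys :
      (List.foldl (pvOuter (PySem.Dict.ofList index)) PySem.Dict.empty
          (PySem.Str.split₀ (PySem.Str.lower query))).keys =
        PySem.Set.ofList ((PySem.Str.split₀ (PySem.Str.lower query)).flatMap
          (pvPostings (PySem.Dict.ofList index))) := by
    rw [pvFold_keys, PySem.Dict.keys_empty, PySem.Set.update_nil_left]
  rw [PySem.Dict.items_eq_map_keys _
        (by rw [hkeys]; exact PySem.Set.nodup_ofList _) ([] : List String), hkeys]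
  rw [PySem.List.dedup_eq_ofList]
  have hflat : ((PySem.Str.split₀ (PySem.Str.lower query)).flatMap
        (fun t => if (PySem.Dict.ofList index).contains t then
          (PySem.Dict.ofList index).getD t [] else [])) =
      ((PySem.Str.split₀ (PySem.Str.lower query)).flatMap
        (pvPostings (PySem.Dict.ofList index))) := rfl
  rw [hflat]
  apply List.map_congr_left
  intro d _
  rw [pvFold_getD, PySem.Dict.getD_empty, PySem.Set.update_nil_left]
  congr 2
  apply List.filter_congr
  intro t _
  unfold pvPostings
  by_cases hc : (PySem.Dict.ofList index).contains t = true <;> simp [hc]
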